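-- pv_equiv track=rewrite | github.com/amrahimran/BASTION | python_scripts/FirewallCheck.py | parse_firewall_output
-- ===== SOURCE A (Python) =====
-- def parse_firewall_output(raw):
--     """Parse the netsh firewall output into structured sections."""
--     profiles = {}
--     current_profile = None
--
--     for line in raw.splitlines():
--         line = line.strip()
--
--         # Detect profile name (Domain, Private, Public)
--         if line.endswith("Profile Settings:"):
--             current_profile = line.replace("Profile Settings:", "").strip()
--             profiles[current_profile] = {}
--             continue
--
--         # Parse Key : Value lines
--         if ":" in line and current_profile:
--             key, value = line.split(":", 1)
--             profiles[current_profile][key.strip()] = value.strip()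
--
--     return profiles
-- ===== SOURCE B (Python) =====
-- def parse_firewall_output(raw):
--     """Parse the netsh firewall output into structured sections (two-pass: group, then parse)."""
--     # Pass 1: partition stripped lines into profile blocks.
--     blocks = []
--     for line in raw.splitlines():
--         line = line.strip()
--         if line.endswith("Profile Settings:"):
--             name = line.replace("Profile Settings:", "").strip()
--             blocks.append((name, []))
--         elif blocks:
--             blocks[-1][1].append(line)
--
--     # Pass 2: parse each block's "Key : Value" lines.
--     profiles = {}
--     for name, lines in blocks:
--         section = {}
--         for line in lines:
--             if ":" in line:
--                 key, value = line.split(":", 1)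
--                 section[key.strip()] = value.strip()
--         profiles[name] = section
--     return profiles
-- ===== Notes on version B (the rewrite author's own statement) =====
-- stated objective: alternative
-- what changed: Replaces A's single stateful scan (a current-profile variable mutated while walking the lines) by a two-pass segment structure: pass 1 partitions the stripped lines into profile blocks, pass 2 parses each block's colon-separated lines into a dict and assigns it to its profile.
-- intended difference: On inputs whose last header line with an empty profile name (a line that strips to the bare profile-settings suffix) is followed, before any further header, by a line containing a colon, A returns an empty section for that empty name because Python's truthiness test on the current profile name is false for the empty string, while B returns the parsed entries of that section, which is the intended value. — e.g. on parse_firewall_output("Profile Settings:\na : b"): A returns [("", [])], B returns [("", [("a", "b")])]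
import Mathlib
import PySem

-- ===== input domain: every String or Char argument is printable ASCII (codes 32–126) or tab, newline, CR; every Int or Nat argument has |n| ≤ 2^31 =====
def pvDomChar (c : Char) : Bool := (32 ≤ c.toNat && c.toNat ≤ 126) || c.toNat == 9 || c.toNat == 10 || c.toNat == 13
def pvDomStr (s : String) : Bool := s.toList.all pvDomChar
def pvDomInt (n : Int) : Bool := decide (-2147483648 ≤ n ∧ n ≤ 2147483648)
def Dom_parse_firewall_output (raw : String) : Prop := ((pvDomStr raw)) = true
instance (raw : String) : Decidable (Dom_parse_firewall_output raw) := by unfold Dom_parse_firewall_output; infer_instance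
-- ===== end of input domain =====

-- B re-implements the parser as two passes (group lines into profile blocks, then parse each block);
-- same return value as A except on the D_ corner below, where A's truthiness test drops a section's entries.

-- ===== PORT A =====
def parse_firewall_output (raw : String) : List (String × List (String × String)) :=
  let step : (PySem.Dict String (PySem.Dict String String) × Option String) → String →
      (PySem.Dict String (PySem.Dict String String) × Option String) := fun st line0 =>
    let line := PySem.Str.strip line0
    if PySem.Str.endswith line "Profile Settings:" then
      let cur := PySem.Str.strip (PySem.Str.replace line "Profile Settings:" "")
      (st.1.insert cur PySem.Dict.empty, some cur)
    else
      match st.2 with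
      | some cur =>
        if PySem.Str.isIn ":" line && !(cur == "") then
          match PySem.Str.splitMax? line ":" 1 with
          | some [key, value] =>
            (st.1.modify cur PySem.Dict.empty
              (fun s => s.insert (PySem.Str.strip key) (PySem.Str.strip value)), st.2)
          | _ => st
        else st
      | none => st
  let fin := (PySem.Str.splitlines raw).foldl step (PySem.Dict.empty, none)
  fin.1.items.map (fun p => (p.1, p.2.items))

-- ===== PORT B =====
def parse_firewall_output_alt (raw : String) : List (String × List (String × String)) :=
  -- Pass 1: partition stripped lines into profile blocks.
  let blocks := (PySem.Str.splitlines raw).foldl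
    (fun (bs : List (String × List String)) line0 =>
      let line := PySem.Str.strip line0
      if PySem.Str.endswith line "Profile Settings:" then
        bs ++ [(PySem.Str.strip (PySem.Str.replace line "Profile Settings:" ""), [])]
      else
        match bs.getLast? with
        | none => bs
        | some b => bs.dropLast ++ [(b.1, b.2 ++ [line])]) []
  -- Pass 2: parse each block's "Key : Value" lines.
  let profiles := blocks.foldl
    (fun (d : PySem.Dict String (PySem.Dict String String)) nb =>
      let section_ := nb.2.foldl
        (fun (s : PySem.Dict String String) line =>
          if PySem.Str.isIn ":" line then
            match PySem.Str.splitMax? line ":" 1 with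
            | none => s
            | some [] => s
            | some [_] => s
            | some [key, value] => s.insert (PySem.Str.strip key) (PySem.Str.strip value)
            | some (_ :: _ :: _ :: _) => s
          else s) PySem.Dict.empty
      d.insert nb.1 section_) PySem.Dict.empty
  profiles.items.map (fun p => (p.1, p.2.items))

-- ===== PRECONDITION & SPEC =====
-- predicates on a (stripped) line, used only to state D_
def pvHdr (l : String) : Bool := PySem.Str.endswith l "Profile Settings:"
def pvEHdr (l : String) : Bool :=
  pvHdr l && (PySem.Str.strip (PySem.Str.replace l "Profile Settings:" "") == "")
def pvColon (l : String) : Bool := PySem.Str.isIn ":" l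
-- a tail of the stripped lines witnesses the corner: it starts with a header whose profile
-- name is empty, no later line is such a header, and a line containing ':' follows before
-- the next header
def pvDTail : List String → Bool
  | [] => false
  | h :: rest =>
    pvEHdr h && rest.all (fun l => !pvEHdr l) &&
      ((rest.takeWhile (fun l => !pvHdr l)).any pvColon)

-- On inputs whose last header line with an empty profile name (a line that strips to the bare
-- profile-settings suffix) is followed, before any further header, by a line containing a colon,
-- A returns an empty section for that empty name because Python's truthiness test on the current
-- profile name is false for the empty string, while B returns the parsed entries of that
-- section, which is the intended value.
def D_parse_firewall_output (raw : String) : Prop :=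
  (((PySem.Str.splitlines raw).map PySem.Str.strip).tails.any pvDTail) = true
instance (raw : String) : Decidable (D_parse_firewall_output raw) := by
  unfold D_parse_firewall_output; infer_instance

def Spec_parse_firewall_output (raw : String) (out : List (String × List (String × String))) : Prop := ¬ D_parse_firewall_output raw → out = parse_firewall_output_alt raw
instance (raw : String) (out : List (String × List (String × String))) : Decidable (Spec_parse_firewall_output raw out) := by unfold Spec_parse_firewall_output; infer_instance

def pvDiffWitness_parse_firewall_output : String := "Profile Settings:\na : b"
def pvDiffWitnessOut_parse_firewall_output :
    (List (String × List (String × String))) × (List (String × List (String × String))) :=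
  ([("", [])], [("", [("a", "b")])])

-- ===== CLAIM (what is proved, stated in full; the proofs are below) =====
def Claim_unchanged_parse_firewall_output : Prop := ∀ (raw : String), Dom_parse_firewall_output raw → Spec_parse_firewall_output raw (parse_firewall_output raw)
def Claim_exact_parse_firewall_output : Prop := ∀ (raw : String), Dom_parse_firewall_output raw → D_parse_firewall_output raw → parse_firewall_output raw ≠ parse_firewall_output_alt raw
def Claim_changed_parse_firewall_output : Prop := Dom_parse_firewall_output (pvDiffWitness_parse_firewall_output) ∧ D_parse_firewall_output (pvDiffWitness_parse_firewall_output) ∧ parse_firewall_output (pvDiffWitness_parse_firewall_output) = pvDiffWitnessOut_parse_firewall_output.1 ∧ parse_firewall_output_alt (pvDiffWitness_parse_firewall_output) = pvDiffWitnessOut_parse_firewall_output.2 ∧ pvDiffWitnessOut_parse_firewall_output.1 ≠ pvDiffWitnessOut_parse_firewall_output.2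

-- ===== LEMMAS AND PROOFS =====

-- proof-side vocabulary
def pvName (l : String) : String :=
  PySem.Str.strip (PySem.Str.replace l "Profile Settings:" "")

def pvPstep (s : PySem.Dict String String) (line : String) : PySem.Dict String String :=
  if PySem.Str.isIn ":" line then
    match PySem.Str.splitMax? line ":" 1 with
    | none => s
    | some [] => s
    | some [_] => s
    | some [key, value] => s.insert (PySem.Str.strip key) (PySem.Str.strip value)
    | some (_ :: _ :: _ :: _) => s
  else s

def pvParse (ls : List String) : PySem.Dict String String :=
  ls.foldl pvPstep PySem.Dict.empty

-- A's step on an already-stripped line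
def pvStepA (st : PySem.Dict String (PySem.Dict String String) × Option String) (line : String) :
    PySem.Dict String (PySem.Dict String String) × Option String :=
  if PySem.Str.endswith line "Profile Settings:" then
    (st.1.insert (PySem.Str.strip (PySem.Str.replace line "Profile Settings:" "")) PySem.Dict.empty,
      some (PySem.Str.strip (PySem.Str.replace line "Profile Settings:" "")))
  else
    match st.2 with
    | some cur =>
      if PySem.Str.isIn ":" line && !(cur == "") then
        match PySem.Str.splitMax? line ":" 1 with
        | some [key, value] =>
          (st.1.modify cur PySem.Dict.empty
            (fun s => s.insert (PySem.Str.strip key) (PySem.Str.strip value)), st.2)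
        | _ => st
      else st
    | none => st

-- B's pass-1 step on an already-stripped line
def pvStepB (bs : List (String × List String)) (line : String) : List (String × List String) :=
  if PySem.Str.endswith line "Profile Settings:" then
    bs ++ [(PySem.Str.strip (PySem.Str.replace line "Profile Settings:" ""), [])]
  else
    match bs.getLast? with
    | none => bs
    | some b => bs.dropLast ++ [(b.1, b.2 ++ [line])]

-- the segment structure both programs follow
def pvSegs : List String → List (String × List String)
  | [] => []
  | l :: rest =>
    if pvHdr l then
      (pvName l, rest.takeWhile (fun x => !pvHdr x)) ::
        pvSegs (rest.dropWhile (fun x => !pvHdr x))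
    else pvSegs rest
termination_by S => S.length
decreasing_by
  · have := List.length_dropWhile_le (fun x => !pvHdr x) rest; simp; omega
  · simp

def pvAF (d : PySem.Dict String (PySem.Dict String String)) (G : List (String × List String)) :
    PySem.Dict String (PySem.Dict String String) :=
  G.foldl (fun d nb => if nb.1 = "" then d.insert "" PySem.Dict.empty
                       else d.insert nb.1 (pvParse nb.2)) d

def pvBF (d : PySem.Dict String (PySem.Dict String String)) (G : List (String × List String)) :
    PySem.Dict String (PySem.Dict String String) :=
  G.foldl (fun d nb => d.insert nb.1 (pvParse nb.2)) d

def pvEqEx (d₁ d₂ : PySem.Dict String (PySem.Dict String String)) : Prop :=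
  d₁.keys = d₂.keys ∧ d₁.keys.Nodup ∧ ∀ k, k ≠ "" → d₁.get? k = d₂.get? k

def pvPOk : List (String × List String) → Prop
  | [] => True
  | (n, b) :: G =>
    (n = "" → ("" ∈ G.map (·.1) ∨ b.all (fun l => !pvColon l) = true)) ∧ pvPOk G

-- re-inserting a key's current value changes nothing
theorem pv_insert_get?_self {κ ν : Type} [BEq κ] [LawfulBEq κ] (d : PySem.Dict κ ν) (k : κ) (e : ν)
    (hnd : d.keys.Nodup) (h : d.get? k = some e) : d.insert k e = d := by
  apply PySem.Dict.ext
  have hc : d.contains k = true := by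
    rw [PySem.Dict.contains_eq_isSome_get?, h]; rfl
  rw [PySem.Dict.items_insert_of_contains _ _ hc]
  conv_rhs => rw [← List.map_id d.items]
  apply List.map_congr_left
  intro p hp
  by_cases hk : p.1 = k
  · have h2 := PySem.Dict.get?_of_mem_items (d := d) (k := p.1) (v := p.2)
      (by cases p; simpa using hp) hnd
    rw [hk, h] at h2
    cases p with
    | mk a b =>
      simp only [id]
      simp only at hk
      subst hk
      simpa using h2
  · have : (p.1 == k) = false := by simpa using hk
    simp [id, this]

-- block of non-header lines is skipped when the current profile is inert (none or "")
theorem pv_A0 (b : List String) (hb : ∀ l ∈ b, pvHdr l = false)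
    (d : PySem.Dict String (PySem.Dict String String)) (c : Option String)
    (hc : c = none ∨ c = some "") : b.foldl pvStepA (d, c) = (d, c) := by
  induction b with
  | nil => rfl
  | cons l b ih =>
    have hl : pvHdr l = false := hb l (by simp)
    have hl' : PySem.Str.endswith l "Profile Settings:" = false := hl
    have hstep : pvStepA (d, c) l = (d, c) := by
      rcases hc with hc | hc <;> subst hc
      · simp only [pvStepA, hl', Bool.false_eq_true, if_false]
      · simp only [pvStepA, hl', Bool.false_eq_true, if_false]; simp
    rw [List.foldl_cons, hstep]
    exact ih (fun x hx => hb x (by simp [hx]))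

-- block of non-header lines with an active profile n accumulates into profiles[n]
theorem pv_A3 (b : List String) (hb : ∀ l ∈ b, pvHdr l = false) (n : String) (hn : n ≠ "")
    (d : PySem.Dict String (PySem.Dict String String)) (e : PySem.Dict String String)
    (hnd : d.keys.Nodup) (he : d.get? n = some e) :
    b.foldl pvStepA (d, some n) = (d.insert n (b.foldl pvPstep e), some n) := by
  induction b generalizing d e with
  | nil => simp [pv_insert_get?_self d n e hnd he]
  | cons l b ih =>
    have hl : pvHdr l = false := hb l (by simp)
    have hbeq : (n == "") = false := by simpa using hn
    have hgd : d.getD n PySem.Dict.empty = e := PySem.Dict.getD_of_get?_eq_some _ _ he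
    have hstep : pvStepA (d, some n) l = (d.insert n (pvPstep e l), some n) := by
      have hl' : PySem.Str.endswith l "Profile Settings:" = false := hl
      unfold pvStepA pvPstep
      simp only [hl', Bool.false_eq_true, if_false, hbeq, Bool.not_false, Bool.and_true]
      by_cases hcol : PySem.Str.isIn ":" l = true
      · simp only [hcol, if_true]
        cases hsp : PySem.Str.splitMax? l ":" 1 with
        | none => simp [pv_insert_get?_self d n e hnd he]
        | some parts =>
          match parts with
          | [] => simp [pv_insert_get?_self d n e hnd he]
          | [k] => simp [pv_insert_get?_self d n e hnd he]
          | [k, v] => simp [PySem.Dict.modify, hgd]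
          | k :: v :: x :: rest => simp [pv_insert_get?_self d n e hnd he]
      · simp only [show PySem.Str.isIn ":" l = false by simpa using hcol]
        simp [pv_insert_get?_self d n e hnd he]
    rw [List.foldl_cons, hstep, List.foldl_cons]
    rw [ih (fun x hx => hb x (by simp [hx])) (d.insert n (pvPstep e l)) (pvPstep e l)
      (PySem.Dict.nodup_keys_insert _ _ _ hnd) (PySem.Dict.get?_insert_self _ _ _)]
    rw [PySem.Dict.insert_insert_self]

def pvOkA (c : Option String) (S : List String) : Prop :=
  c = none ∨ c = some "" ∨ match S with
    | [] => True
    | x :: _ => pvHdr x = true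

theorem pv_okA_drop (c : Option String) (S : List String) :
    pvOkA c (S.dropWhile (fun x => !pvHdr x)) := by
  induction S with
  | nil => exact Or.inr (Or.inr trivial)
  | cons l rest ih =>
    by_cases hl : pvHdr l = true
    · right; right; simp [hl]
    · simpa [List.dropWhile_cons, Bool.eq_false_iff.mpr hl] using ih

theorem pv_A1 (S : List String) (d : PySem.Dict String (PySem.Dict String String))
    (c : Option String) (hnd : d.keys.Nodup) (hc : pvOkA c S) :
    (S.foldl pvStepA (d, c)).1 = pvAF d (pvSegs S) := by
  induction S using pvSegs.induct generalizing d c with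
  | case1 => simp [pvSegs, pvAF]
  | case2 l rest h ih =>
    have hn : pvName l = PySem.Str.strip (PySem.Str.replace l "Profile Settings:" "") := rfl
    have hstep : pvStepA (d, c) l = (d.insert (pvName l) PySem.Dict.empty, some (pvName l)) := by
      have h' : PySem.Str.endswith l "Profile Settings:" = true := h
      simp only [pvStepA, h', if_true, hn]
    rw [List.foldl_cons, hstep]
    have hsplit : rest = rest.takeWhile (fun x => !pvHdr x) ++ rest.dropWhile (fun x => !pvHdr x) :=
      (List.takeWhile_append_dropWhile).symm
    have hbnh : ∀ x ∈ rest.takeWhile (fun x => !pvHdr x), pvHdr x = false := by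
      intro x hx; simpa using List.mem_takeWhile_imp hx
    have hsegs : pvSegs (l :: rest) =
        (pvName l, rest.takeWhile (fun x => !pvHdr x)) ::
          pvSegs (rest.dropWhile (fun x => !pvHdr x)) := by
      rw [pvSegs]; simp [h]
    rw [hsegs]
    by_cases hname : pvName l = ""
    · rw [hname]
      conv_lhs => rw [hsplit]
      rw [List.foldl_append]
      rw [pv_A0 _ hbnh _ _ (Or.inr rfl)]
      rw [ih (d.insert "" PySem.Dict.empty) (some "")
        (PySem.Dict.nodup_keys_insert _ _ _ hnd) (Or.inr (Or.inl rfl))]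
      simp [pvAF]
    · conv_lhs => rw [hsplit]
      rw [List.foldl_append]
      rw [pv_A3 _ hbnh _ hname _ PySem.Dict.empty
        (PySem.Dict.nodup_keys_insert _ _ _ hnd) (PySem.Dict.get?_insert_self _ _ _)]
      rw [PySem.Dict.insert_insert_self]
      rw [show (List.foldl pvPstep PySem.Dict.empty (rest.takeWhile (fun x => !pvHdr x))) =
        pvParse (rest.takeWhile (fun x => !pvHdr x)) from rfl]
      rw [ih (d.insert (pvName l) (pvParse (rest.takeWhile (fun x => !pvHdr x)))) (some (pvName l))
        (PySem.Dict.nodup_keys_insert _ _ _ hnd) (pv_okA_drop _ _)]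
      simp [pvAF, hname, pvParse]
  | case3 l rest h ih =>
    have hl : pvHdr l = false := by simpa using h
    have hinert : c = none ∨ c = some "" := by
      rcases hc with hc | hc | hc
      · exact Or.inl hc
      · exact Or.inr hc
      · simp only [] at hc; rw [hl] at hc; exact absurd hc (by simp)
    have hstep := pv_A0 [l] (by simpa using hl) d c hinert
    simp only [List.foldl_cons, List.foldl_nil] at hstep
    rw [List.foldl_cons, hstep]
    have hsegs : pvSegs (l :: rest) = pvSegs rest := by rw [pvSegs]; simp [hl]
    rw [hsegs]
    exact ih d c hnd (Or.elim hinert (fun h => Or.inl h) (fun h => Or.inr (Or.inl h)))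

theorem pv_B2 (S : List String) (bs : List (String × List String)) (n : String) (ls : List String) :
    S.foldl pvStepB (bs ++ [(n, ls)]) =
      bs ++ [(n, ls ++ S.takeWhile (fun x => !pvHdr x))] ++
        pvSegs (S.dropWhile (fun x => !pvHdr x)) := by
  induction S generalizing bs n ls with
  | nil => simp [pvSegs]
  | cons l rest ih =>
    by_cases hl : pvHdr l = true
    · have h' : PySem.Str.endswith l "Profile Settings:" = true := hl
      have hstep : pvStepB (bs ++ [(n, ls)]) l = (bs ++ [(n, ls)]) ++ [(pvName l, [])] := by
        simp only [pvStepB, h', if_true]; rfl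
      rw [List.foldl_cons, hstep, ih]
      have hsegs : pvSegs (l :: rest) =
          (pvName l, rest.takeWhile (fun x => !pvHdr x)) ::
            pvSegs (rest.dropWhile (fun x => !pvHdr x)) := by
        rw [pvSegs]; simp [hl]
      simp [hl, hsegs]
    · have hl' : pvHdr l = false := by simpa using hl
      have h' : PySem.Str.endswith l "Profile Settings:" = false := hl'
      have hstep : pvStepB (bs ++ [(n, ls)]) l = bs ++ [(n, ls ++ [l])] := by
        simp only [pvStepB, h', Bool.false_eq_true, if_false, List.getLast?_concat,
          List.dropLast_concat]
      rw [List.foldl_cons, hstep, ih]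
      simp [hl']


theorem pv_B3 (S : List String) : S.foldl pvStepB [] = pvSegs S := by
  induction S with
  | nil => simp [pvSegs]
  | cons l rest ih =>
    by_cases hl : pvHdr l = true
    · have h' : PySem.Str.endswith l "Profile Settings:" = true := hl
      have hstep : pvStepB [] l = [] ++ [(pvName l, [])] := by
        simp only [pvStepB, h', if_true]; rfl
      rw [List.foldl_cons, hstep, pv_B2]
      rw [pvSegs]; simp [hl]
    · have hl' : pvHdr l = false := by simpa using hl
      have h' : PySem.Str.endswith l "Profile Settings:" = false := hl'
      have hstep : pvStepB [] l = [] := by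
        simp only [pvStepB, h', Bool.false_eq_true, if_false]; rfl
      rw [List.foldl_cons, hstep, ih]
      rw [pvSegs]; simp [hl']

theorem pv_parse_noColon (b : List String) (h : b.all (fun l => !pvColon l) = true)
    (e : PySem.Dict String String) : b.foldl pvPstep e = e := by
  induction b generalizing e with
  | nil => rfl
  | cons l b ih =>
    have hl : pvColon l = false := by
      have := List.all_eq_true.mp h l (by simp)
      simpa using this
    have hl' : PySem.Str.isIn ":" l = false := hl
    have hstep : pvPstep e l = e := by simp only [pvPstep, hl', Bool.false_eq_true, if_false]
    rw [List.foldl_cons, hstep]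
    exact ih (by rw [List.all_cons] at h; exact ((Bool.and_eq_true _ _).mp h).2) e

-- EqEx preservation lemmas
theorem pv_E1 (d₁ d₂ : PySem.Dict String (PySem.Dict String String)) (h : pvEqEx d₁ d₂)
    (x y : PySem.Dict String String) : pvEqEx (d₁.insert "" x) (d₂.insert "" y) := by
  obtain ⟨hk, hnd, hg⟩ := h
  have hc : d₁.contains "" = d₂.contains "" := by
    rw [PySem.Dict.contains_eq_decide_mem_keys, PySem.Dict.contains_eq_decide_mem_keys, hk]
  refine ⟨?_, PySem.Dict.nodup_keys_insert _ _ _ hnd, ?_⟩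
  · by_cases hm : d₁.contains "" = true
    · rw [PySem.Dict.keys_insert_of_contains _ _ hm,
        PySem.Dict.keys_insert_of_contains _ _ (hc ▸ hm), hk]
    · have hm' : d₁.contains "" = false := by simpa using hm
      rw [PySem.Dict.keys_insert_of_not_contains _ _ hm',
        PySem.Dict.keys_insert_of_not_contains _ _ (hc ▸ hm'), hk]
  · intro k hk'
    rw [PySem.Dict.get?_insert_of_ne _ _ hk', PySem.Dict.get?_insert_of_ne _ _ hk']
    exact hg k hk' 

theorem pv_E2 (d₁ d₂ : PySem.Dict String (PySem.Dict String String)) (h : pvEqEx d₁ d₂)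
    (n : String) (hn : n ≠ "") (w : PySem.Dict String String) :
    pvEqEx (d₁.insert n w) (d₂.insert n w) := by
  obtain ⟨hk, hnd, hg⟩ := h
  have hc : d₁.contains n = d₂.contains n := by
    rw [PySem.Dict.contains_eq_decide_mem_keys, PySem.Dict.contains_eq_decide_mem_keys, hk]
  refine ⟨?_, PySem.Dict.nodup_keys_insert _ _ _ hnd, ?_⟩
  · by_cases hm : d₁.contains n = true
    · rw [PySem.Dict.keys_insert_of_contains _ _ hm,
        PySem.Dict.keys_insert_of_contains _ _ (hc ▸ hm), hk]
    · have hm' : d₁.contains n = false := by simpa using hm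
      rw [PySem.Dict.keys_insert_of_not_contains _ _ hm',
        PySem.Dict.keys_insert_of_not_contains _ _ (hc ▸ hm'), hk]
  · intro k hk'
    by_cases hkn : k = n
    · subst hkn
      rw [PySem.Dict.get?_insert_self, PySem.Dict.get?_insert_self]
    · rw [PySem.Dict.get?_insert_of_ne _ _ hkn, PySem.Dict.get?_insert_of_ne _ _ hkn]
      exact hg k hk' 

theorem pv_E3 (d₁ d₂ : PySem.Dict String (PySem.Dict String String)) (h : pvEqEx d₁ d₂)
    (v : PySem.Dict String String) : d₁.insert "" v = d₂.insert "" v := by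
  obtain ⟨hk, hnd, hg⟩ := h
  have hnd2 : d₂.keys.Nodup := hk ▸ hnd
  have hc : d₁.contains "" = d₂.contains "" := by
    rw [PySem.Dict.contains_eq_decide_mem_keys, PySem.Dict.contains_eq_decide_mem_keys, hk]
  have hkeq : (d₁.insert "" v).keys = (d₂.insert "" v).keys := by
    by_cases hm : d₁.contains "" = true
    · rw [PySem.Dict.keys_insert_of_contains _ _ hm,
        PySem.Dict.keys_insert_of_contains _ _ (hc ▸ hm), hk]
    · have hm' : d₁.contains "" = false := by simpa using hm
      rw [PySem.Dict.keys_insert_of_not_contains _ _ hm',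
        PySem.Dict.keys_insert_of_not_contains _ _ (hc ▸ hm'), hk]
  apply PySem.Dict.ext
  rw [PySem.Dict.items_eq_map_keys _ (PySem.Dict.nodup_keys_insert _ _ _ hnd) PySem.Dict.empty,
    PySem.Dict.items_eq_map_keys _ (PySem.Dict.nodup_keys_insert _ _ _ hnd2) PySem.Dict.empty,
    hkeq]
  apply List.map_congr_left
  intro k _
  by_cases hkn : k = ""
  · subst hkn
    rw [PySem.Dict.getD_insert_self, PySem.Dict.getD_insert_self]
  · rw [PySem.Dict.getD_insert_of_ne _ _ _ hkn, PySem.Dict.getD_insert_of_ne _ _ _ hkn,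
      PySem.Dict.getD_eq_get?_getD, PySem.Dict.getD_eq_get?_getD, hg k hkn]

-- the comparison of the two assembly folds
theorem pv_CMP (G : List (String × List String))
    (d₁ d₂ : PySem.Dict String (PySem.Dict String String)) (hP : pvPOk G)
    (h : (d₁ = d₂ ∧ d₁.keys.Nodup) ∨ (pvEqEx d₁ d₂ ∧ "" ∈ G.map (·.1))) :
    pvAF d₁ G = pvBF d₂ G := by
  induction G generalizing d₁ d₂ with
  | nil =>
    rcases h with ⟨rfl, _⟩ | ⟨_, hmem⟩
    · rfl
    · simp at hmem
  | cons nb G ih =>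
    obtain ⟨n, b⟩ := nb
    obtain ⟨hPh, hPt⟩ := hP
    show pvAF (if n = "" then d₁.insert "" PySem.Dict.empty else d₁.insert n (pvParse b)) G =
      pvBF (d₂.insert n (pvParse b)) G
    rcases h with ⟨rfl, hnd⟩ | ⟨hee, hmem⟩
    · by_cases hn : n = ""
      · subst hn
        simp only [if_true]
        rcases hPh rfl with hm | hcf
        · exact ih _ _ hPt (Or.inr ⟨pv_E1 _ _ ⟨rfl, hnd, fun _ _ => rfl⟩ _ _, hm⟩)
        · rw [show pvParse b = PySem.Dict.empty from pv_parse_noColon b hcf _]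
          exact ih _ _ hPt (Or.inl ⟨rfl, PySem.Dict.nodup_keys_insert _ _ _ hnd⟩)
      · rw [if_neg hn]
        exact ih _ _ hPt (Or.inl ⟨rfl, PySem.Dict.nodup_keys_insert _ _ _ hnd⟩)
    · by_cases hn : n = ""
      · subst hn
        simp only [if_true]
        rcases hPh rfl with hm | hcf
        · exact ih _ _ hPt (Or.inr ⟨pv_E1 _ _ hee _ _, hm⟩)
        · rw [show pvParse b = PySem.Dict.empty from pv_parse_noColon b hcf _]
          exact ih _ _ hPt (Or.inl ⟨pv_E3 _ _ hee _, PySem.Dict.nodup_keys_insert _ _ _ hee.2.1⟩)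
      · rw [if_neg hn]
        have hn' : ¬"" = (n, b).1 := fun hh => hn hh.symm
        have hmemG : "" ∈ G.map (·.1) := by
          rcases List.mem_map.mp hmem with ⟨p, hp, hp1⟩
          rcases List.mem_cons.mp hp with rfl | hp
          · exact absurd hp1.symm hn'
          · exact List.mem_map.mpr ⟨p, hp, hp1⟩
        exact ih _ _ hPt (Or.inr ⟨pv_E2 _ _ hee n hn _, hmemG⟩)

-- every header line contributes its name to the segment names
theorem pv_N (S : List String) (x : String) (hx : x ∈ S) (hh : pvHdr x = true) :
    pvName x ∈ (pvSegs S).map (·.1) := by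
  induction S using pvSegs.induct with
  | case1 => simp at hx
  | case2 l rest h ih =>
    have hsegs : pvSegs (l :: rest) =
        (pvName l, rest.takeWhile (fun x => !pvHdr x)) ::
          pvSegs (rest.dropWhile (fun x => !pvHdr x)) := by
      rw [pvSegs]; simp [h]
    rw [hsegs]
    rcases List.mem_cons.mp hx with rfl | hx
    · simp
    · rw [← List.takeWhile_append_dropWhile (p := fun x => !pvHdr x) (l := rest)] at hx
      rcases List.mem_append.mp hx with hx | hx
      · have := List.mem_takeWhile_imp hx
        rw [hh] at this; simp at this
      · simpa using Or.inr (ih hx)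
  | case3 l rest h ih =>
    have hl : pvHdr l = false := by simpa using h
    have hsegs : pvSegs (l :: rest) = pvSegs rest := by rw [pvSegs]; simp [hl]
    rw [hsegs]
    rcases List.mem_cons.mp hx with rfl | hx
    · rw [hh] at hl; simp at hl
    · exact ih hx

theorem pv_BR (S : List String) (h : S.tails.any pvDTail = false) : pvPOk (pvSegs S) := by
  have hSuf : ∀ t, t <:+ S → pvDTail t = false := by
    intro t ht
    exact Bool.eq_false_iff.mpr (List.any_eq_false.mp h t ((List.mem_tails _ _).mpr ht))
  clear h
  induction S using pvSegs.induct with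
  | case1 => simp [pvSegs, pvPOk]
  | case2 l rest h ih =>
    have hsegs : pvSegs (l :: rest) =
        (pvName l, rest.takeWhile (fun x => !pvHdr x)) ::
          pvSegs (rest.dropWhile (fun x => !pvHdr x)) := by
      rw [pvSegs]; simp [h]
    rw [hsegs]
    have hdwsuf : rest.dropWhile (fun x => !pvHdr x) <:+ l :: rest :=
      (List.dropWhile_suffix _).trans (List.suffix_cons l rest)
    refine ⟨?_, ih (fun t ht => hSuf t (ht.trans hdwsuf))⟩
    intro hname
    by_cases hcf : (rest.takeWhile (fun x => !pvHdr x)).all (fun l => !pvColon l) = true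
    · exact Or.inr hcf
    · obtain ⟨y, hy, hcy⟩ := List.all_eq_false.mp (Bool.eq_false_iff.mpr hcf)
      have hcy' : pvColon y = true := by simpa using hcy
      by_cases hEH : (rest.dropWhile (fun x => !pvHdr x)).any pvEHdr = true
      · obtain ⟨y', hy', hey'⟩ := List.any_eq_true.mp hEH
        have hhy' : pvHdr y' = true := ((Bool.and_eq_true _ _).mp hey').1
        have hny' : pvName y' = "" := by
          have := ((Bool.and_eq_true _ _).mp hey').2
          simpa [pvName] using this
        have := pv_N _ y' hy' hhy'
        rw [hny'] at this
        exact Or.inl this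
      · exfalso
        have hd : pvDTail (l :: rest) = true := by
          unfold pvDTail
          refine (Bool.and_eq_true _ _).mpr ⟨(Bool.and_eq_true _ _).mpr ⟨?_, ?_⟩, ?_⟩
          · unfold pvEHdr
            refine (Bool.and_eq_true _ _).mpr ⟨h, ?_⟩
            simpa [pvName] using hname
          · rw [List.all_eq_true]
            intro x hx
            rw [← List.takeWhile_append_dropWhile (p := fun x => !pvHdr x) (l := rest)] at hx
            rcases List.mem_append.mp hx with hx | hx
            · have := List.mem_takeWhile_imp hx
              have hhx : pvHdr x = false := by simpa using this
              unfold pvEHdr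
              simp [hhx]
            · have := List.any_eq_false.mp (by simpa using hEH) x hx
              simp [this]
          · rw [List.any_eq_true]
            exact ⟨y, hy, hcy'⟩
        rw [hSuf (l :: rest) (List.suffix_refl _)] at hd
        simp at hd
  | case3 l rest h ih =>
    have hl : pvHdr l = false := by simpa using h
    have hsegs : pvSegs (l :: rest) = pvSegs rest := by rw [pvSegs]; simp [hl]
    rw [hsegs]
    exact ih (fun t ht => hSuf t (ht.trans (List.suffix_cons l rest)))

-- representation of the two ports through the segment structure
theorem pv_repA (raw : String) : parse_firewall_output raw =
    (pvAF PySem.Dict.empty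
      (pvSegs ((PySem.Str.splitlines raw).map PySem.Str.strip))).items.map
      (fun p => (p.1, p.2.items)) := by
  have e1 : ((PySem.Str.splitlines raw).map PySem.Str.strip).foldl pvStepA
      (PySem.Dict.empty, (none : Option String)) =
      (PySem.Str.splitlines raw).foldl (fun st l => pvStepA st (PySem.Str.strip l))
        (PySem.Dict.empty, none) := List.foldl_map
  have hA : parse_firewall_output raw =
      ((((PySem.Str.splitlines raw).map PySem.Str.strip).foldl pvStepA
        (PySem.Dict.empty, none)).1).items.map (fun p => (p.1, p.2.items)) := by
    rw [e1]; rfl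
  rw [hA, pv_A1 _ _ _ PySem.Dict.nodup_keys_empty (Or.inl rfl)]

theorem pv_repB (raw : String) : parse_firewall_output_alt raw =
    (pvBF PySem.Dict.empty
      (pvSegs ((PySem.Str.splitlines raw).map PySem.Str.strip))).items.map
      (fun p => (p.1, p.2.items)) := by
  have e2 : ((PySem.Str.splitlines raw).map PySem.Str.strip).foldl pvStepB
      ([] : List (String × List String)) =
      (PySem.Str.splitlines raw).foldl (fun bs l => pvStepB bs (PySem.Str.strip l)) [] :=
    List.foldl_map
  rw [← pv_B3, e2]; rfl

-- segment names all come from header lines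
theorem pv_N2 (S : List String) (n : String) (hn : n ∈ (pvSegs S).map (·.1)) :
    ∃ x ∈ S, pvHdr x = true ∧ pvName x = n := by
  induction S using pvSegs.induct with
  | case1 => simp [pvSegs] at hn
  | case2 l rest h ih =>
    have hsegs : pvSegs (l :: rest) =
        (pvName l, rest.takeWhile (fun x => !pvHdr x)) ::
          pvSegs (rest.dropWhile (fun x => !pvHdr x)) := by
      rw [pvSegs]; simp [h]
    rw [hsegs] at hn
    rcases List.mem_cons.mp hn with hn | hn
    · exact ⟨l, by simp, h, hn.symm⟩
    · obtain ⟨x, hx, hhx, hnx⟩ := ih hn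
      exact ⟨x, List.mem_cons_of_mem _ ((List.dropWhile_suffix _).subset hx), hhx, hnx⟩
  | case3 l rest h ih =>
    have hl : pvHdr l = false := by simpa using h
    have hsegs : pvSegs (l :: rest) = pvSegs rest := by rw [pvSegs]; simp [hl]
    rw [hsegs] at hn
    obtain ⟨x, hx, hhx, hnx⟩ := ih hn
    exact ⟨x, List.mem_cons_of_mem _ hx, hhx, hnx⟩

-- inside D_ the segment structure violates pvPOk
theorem pv_DQ (S : List String) (h : S.tails.any pvDTail = true) : ¬ pvPOk (pvSegs S) := by
  induction S using pvSegs.induct with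
  | case1 => simp [pvDTail] at h
  | case2 l rest hh ih =>
    rw [List.tails_cons, List.any_cons] at h
    rcases Bool.or_eq_true_iff.mp h with hdt | htl
    · unfold pvDTail at hdt
      have heh := ((Bool.and_eq_true _ _).mp ((Bool.and_eq_true _ _).mp hdt).1).1
      have hall := ((Bool.and_eq_true _ _).mp ((Bool.and_eq_true _ _).mp hdt).1).2
      have hany := ((Bool.and_eq_true _ _).mp hdt).2
      have hname : pvName l = "" := by
        have := ((Bool.and_eq_true _ _).mp heh).2
        simpa [pvName] using this
      have hsegs : pvSegs (l :: rest) =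
          (pvName l, rest.takeWhile (fun x => !pvHdr x)) ::
            pvSegs (rest.dropWhile (fun x => !pvHdr x)) := by
        rw [pvSegs]; simp [hh]
      rw [hsegs]
      intro hP
      simp only [pvPOk] at hP
      rcases hP.1 hname with hm | hcf
      · obtain ⟨x, hx, hhx, hnx⟩ := pv_N2 _ _ hm
        have hx' : x ∈ rest := (List.dropWhile_suffix _).subset hx
        have := List.all_eq_true.mp hall x hx'
        have hex : pvEHdr x = true := by
          unfold pvEHdr
          refine (Bool.and_eq_true _ _).mpr ⟨hhx, ?_⟩
          simpa [pvName] using hnx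
        rw [hex] at this
        simp at this
      · obtain ⟨y, hy, hcy⟩ := List.any_eq_true.mp hany
        have := List.all_eq_true.mp hcf y hy
        rw [hcy] at this
        simp at this
    · obtain ⟨t, htm, hdt⟩ := List.any_eq_true.mp htl
      have hts : t <:+ rest := (List.mem_tails _ _).mp htm
      have htne : t ≠ [] := by
        intro hte; rw [hte] at hdt; simp [pvDTail] at hdt
      obtain ⟨h', t', rfl⟩ := List.exists_cons_of_ne_nil htne
      have hhdr : pvHdr h' = true := by
        unfold pvDTail at hdt
        exact (Bool.and_eq_true _ _).mp
          (((Bool.and_eq_true _ _).mp ((Bool.and_eq_true _ _).mp hdt).1).1) |>.1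
      -- the witness tail lies inside the dropWhile part
      have htdw : (h' :: t') <:+ rest.dropWhile (fun x => !pvHdr x) := by
        conv at hts => rw [← List.takeWhile_append_dropWhile
          (p := fun x => !pvHdr x) (l := rest)]
        rcases Nat.lt_or_ge (rest.dropWhile (fun x => !pvHdr x)).length (h' :: t').length
          with hlt | hle
        case inr => exact List.suffix_of_suffix_length_le hts (List.suffix_append _ _) hle
        case inl =>
          exfalso
          obtain ⟨u, hu⟩ := hts
          have hlen := congrArg List.length hu
          simp only [List.length_append] at hlen
          have hul : u.length < (rest.takeWhile (fun x => !pvHdr x)).length := by omega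
          have hul2 : u.length < (u ++ h' :: t').length := by simp
          have h1 : (u ++ h' :: t')[u.length]'hul2 = h' := by
            rw [List.getElem_append_right (by omega)]
            simp
          have hul3 : u.length <
              (rest.takeWhile (fun x => !pvHdr x) ++
                rest.dropWhile (fun x => !pvHdr x)).length := by
            rw [← hu]; exact hul2
          have h2 : (rest.takeWhile (fun x => !pvHdr x) ++
              rest.dropWhile (fun x => !pvHdr x))[u.length]'hul3 =
              (rest.takeWhile (fun x => !pvHdr x))[u.length]'hul :=
            List.getElem_append_left hul
          have h3 : (rest.takeWhile (fun x => !pvHdr x) ++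
              rest.dropWhile (fun x => !pvHdr x))[u.length]'hul3 = h' := by
            simp only [← hu]
            exact h1
          have hmem : h' ∈ rest.takeWhile (fun x => !pvHdr x) := by
            rw [← h3, h2]
            exact List.getElem_mem hul
          have := List.mem_takeWhile_imp hmem
          rw [hhdr] at this
          simp at this
      have hdw : (rest.dropWhile (fun x => !pvHdr x)).tails.any pvDTail = true :=
        List.any_eq_true.mpr ⟨h' :: t', (List.mem_tails _ _).mpr htdw, hdt⟩
      have hsegs : pvSegs (l :: rest) =
          (pvName l, rest.takeWhile (fun x => !pvHdr x)) ::
            pvSegs (rest.dropWhile (fun x => !pvHdr x)) := by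
        rw [pvSegs]; simp [hh]
      rw [hsegs]
      intro hP
      simp only [pvPOk] at hP
      exact ih hdw hP.2
  | case3 l rest hh ih =>
    have hl : pvHdr l = false := by simpa using hh
    rw [List.tails_cons, List.any_cons] at h
    have hhd : pvDTail (l :: rest) = false := by
      simp only [pvDTail, pvEHdr, hl]
      simp
    rw [hhd] at h
    have hsegs : pvSegs (l :: rest) = pvSegs rest := by rw [pvSegs]; simp [hl]
    rw [hsegs]
    exact ih (by simpa using h)

-- folds that never insert at "" leave its binding unchanged
theorem pv_stabA (G : List (String × List String))
    (d : PySem.Dict String (PySem.Dict String String)) (h : "" ∉ G.map (·.1)) :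
    (pvAF d G).get? "" = d.get? "" := by
  induction G generalizing d with
  | nil => rfl
  | cons nb G ih =>
    have hn : nb.1 ≠ "" := fun he => h (by simp [← he])
    have hG : "" ∉ G.map (·.1) := fun hm => h (by simp [hm])
    show (pvAF (if nb.1 = "" then d.insert "" PySem.Dict.empty
      else d.insert nb.1 (pvParse nb.2)) G).get? "" = d.get? ""
    rw [if_neg hn, ih _ hG, PySem.Dict.get?_insert_of_ne _ _ (fun he => hn he.symm)]

theorem pv_stabB (G : List (String × List String))
    (d : PySem.Dict String (PySem.Dict String String)) (h : "" ∉ G.map (·.1)) :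
    (pvBF d G).get? "" = d.get? "" := by
  induction G generalizing d with
  | nil => rfl
  | cons nb G ih =>
    have hn : nb.1 ≠ "" := fun he => h (by simp [← he])
    have hG : "" ∉ G.map (·.1) := fun hm => h (by simp [hm])
    show (pvBF (d.insert nb.1 (pvParse nb.2)) G).get? "" = d.get? ""
    rw [ih _ hG, PySem.Dict.get?_insert_of_ne _ _ (fun he => hn he.symm)]

-- when pvPOk fails, A stores {} at "" and B stores the parse of the offending block
theorem pv_VA (G : List (String × List String))
    (d : PySem.Dict String (PySem.Dict String String)) (h : ¬ pvPOk G) :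
    (pvAF d G).get? "" = some PySem.Dict.empty := by
  induction G generalizing d with
  | nil => simp [pvPOk] at h
  | cons nb G ih =>
    obtain ⟨n, b⟩ := nb
    show (pvAF (if n = "" then d.insert "" PySem.Dict.empty
      else d.insert n (pvParse b)) G).get? "" = some PySem.Dict.empty
    by_cases hP : pvPOk G
    · have hv : n = "" ∧ "" ∉ G.map (·.1) ∧ ¬ b.all (fun l => !pvColon l) = true := by
        simp only [pvPOk] at h
        by_cases hn : n = ""
        · subst hn
          refine ⟨rfl, ?_, ?_⟩ <;> by_contra hc <;> exact h ⟨fun _ => by tauto, hP⟩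
        · exact absurd ⟨fun he => absurd he hn, hP⟩ h
      obtain ⟨rfl, hnm, _⟩ := hv
      rw [if_pos rfl, pv_stabA _ _ hnm, PySem.Dict.get?_insert_self]
    · split_ifs <;> exact ih _ (fun hp => h (by simp [pvPOk]; exact ⟨by tauto, hp⟩))

theorem pv_VB (G : List (String × List String))
    (d : PySem.Dict String (PySem.Dict String String)) (h : ¬ pvPOk G) :
    ∃ b, (∃ y ∈ b, pvColon y = true) ∧ (pvBF d G).get? "" = some (pvParse b) := by
  induction G generalizing d with
  | nil => simp [pvPOk] at h
  | cons nb G ih =>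
    obtain ⟨n, b⟩ := nb
    show ∃ b', (∃ y ∈ b', pvColon y = true) ∧
      (pvBF (d.insert n (pvParse b)) G).get? "" = some (pvParse b')
    by_cases hP : pvPOk G
    · have hv : n = "" ∧ "" ∉ G.map (·.1) ∧ ¬ b.all (fun l => !pvColon l) = true := by
        simp only [pvPOk] at h
        by_cases hn : n = ""
        · subst hn
          refine ⟨rfl, ?_, ?_⟩ <;> by_contra hc <;> exact h ⟨fun _ => by tauto, hP⟩
        · exact absurd ⟨fun he => absurd he hn, hP⟩ h
      obtain ⟨rfl, hnm, hcf⟩ := hv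
      obtain ⟨y, hy, hcy⟩ := List.all_eq_false.mp (Bool.eq_false_iff.mpr hcf)
      refine ⟨b, ⟨y, hy, by simpa using hcy⟩, ?_⟩
      rw [pv_stabB _ _ hnm, PySem.Dict.get?_insert_self]
    · exact ih _ (fun hp => h (by simp [pvPOk]; exact ⟨by tauto, hp⟩))

-- split(":", 1) on a line containing ":" yields exactly two parts
theorem pv_go0 (fuel : Nat) (l cur : List Char) (acc : List (List Char)) :
    ∃ x, PySem.Chars.splitOnMax.go [':'] fuel 0 l cur acc = acc.reverse ++ [x] := by
  cases fuel with
  | zero => exact ⟨cur.reverse ++ l, by simp [PySem.Chars.splitOnMax.go]⟩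
  | succ fuel =>
    cases l with
    | nil => exact ⟨cur.reverse, by simp [PySem.Chars.splitOnMax.go]⟩
    | cons c rest => exact ⟨cur.reverse ++ (c :: rest), by simp [PySem.Chars.splitOnMax.go]⟩

theorem pv_go1 (fuel : Nat) (l cur : List Char) (acc : List (List Char))
    (hf : l.length < fuel) (hm : ':' ∈ l) :
    ∃ k v, PySem.Chars.splitOnMax.go [':'] fuel 1 l cur acc = acc.reverse ++ [k, v] := by
  induction fuel generalizing l cur acc with
  | zero => omega
  | succ fuel ih =>
    cases l with
    | nil => simp at hm
    | cons c rest =>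
      by_cases hc : c = ':'
      · subst hc
        have hpre : [':'].isPrefixOf (':' :: rest) = true := by simp [List.isPrefixOf]
        obtain ⟨x, hx⟩ := pv_go0 fuel (List.drop 1 (':' :: rest)) [] (cur.reverse :: acc)
        refine ⟨cur.reverse, x, ?_⟩
        simp only [PySem.Chars.splitOnMax.go, hpre]
        norm_num
        simp only [List.drop_one, List.tail_cons] at hx ⊢
        rw [hx]
        simp
      · have hpre : [':'].isPrefixOf (c :: rest) = false := by
          simp [List.isPrefixOf]
          exact fun h => hc h.symm
        have hm' : ':' ∈ rest := by
          rcases List.mem_cons.mp hm with h | h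
          · exact absurd h.symm hc
          · exact h
        obtain ⟨k, v, hkv⟩ := ih rest (c :: cur) acc (by simpa using Nat.lt_of_succ_lt_succ hf) hm'
        refine ⟨k, v, ?_⟩
        simp only [PySem.Chars.splitOnMax.go, hpre]
        simp [hkv]

theorem pv_spx (l : String) (h : PySem.Str.isIn ":" l = true) :
    ∃ k v, PySem.Str.splitMax? l ":" 1 = some [k, v] := by
  have hm : ':' ∈ l.toList := by
    have h2 := (PySem.Str.isIn_iff_infix ":" l).mp h
    have he : (":" : String).toList = [':'] := rfl
    rw [he] at h2
    exact h2.subset (by simp)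
  have hlen : l.toList.length = l.length := String.length_toList
  obtain ⟨k, v, hkv⟩ := pv_go1 (l.length + 1) l.toList [] [] (by omega) hm
  refine ⟨String.ofList k, String.ofList v, ?_⟩
  simp only [PySem.Str.splitMax?, PySem.Chars.splitMax?, PySem.Chars.splitOnMax]
  norm_num
  rw [show (":" : String).toList = [':'] from rfl, hkv]
  simp

-- a colon line makes the parsed block dictionary non-empty
theorem pv_pstep_colon_len (e : PySem.Dict String String) (y : String)
    (hy : pvColon y = true) : 1 ≤ (pvPstep e y).items.length := by
  obtain ⟨k, v, hkv⟩ := pv_spx y hy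
  have hy' : PySem.Str.isIn ":" y = true := hy
  unfold pvPstep
  rw [hy', if_pos rfl, hkv]
  by_cases hc : e.contains (PySem.Str.strip k) = true
  · rw [PySem.Dict.items_insert_of_contains _ _ hc]
    have : (PySem.Str.strip k) ∈ e.keys := (PySem.Dict.contains_iff_mem_keys _ _).mp hc
    have hne : e.items ≠ [] := by
      intro he
      rw [show e.keys = e.items.map (·.1) from rfl, he] at this
      simp at this
    simpa [List.length_map] using List.length_pos_of_ne_nil hne
  · rw [PySem.Dict.items_insert_of_not_contains _ _ (by simpa using hc)]
    simp

theorem pv_len_step (e : PySem.Dict String String) (l : String) :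
    e.items.length ≤ (pvPstep e l).items.length := by
  unfold pvPstep
  by_cases hcol : PySem.Str.isIn ":" l = true
  · rw [hcol, if_pos rfl]
    cases hsp : PySem.Str.splitMax? l ":" 1 with
    | none => simp
    | some parts =>
      match parts with
      | [] => simp
      | [k] => simp
      | [k, v] =>
        by_cases hc : e.contains (PySem.Str.strip k) = true
        · rw [PySem.Dict.items_insert_of_contains _ _ hc]; simp
        · rw [PySem.Dict.items_insert_of_not_contains _ _ (by simpa using hc)]; simp
      | k :: v :: x :: r => simp
  · rw [show PySem.Str.isIn ":" l = false by simpa using hcol]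
    simp

theorem pv_len_fold (b : List String) (e : PySem.Dict String String) :
    e.items.length ≤ (b.foldl pvPstep e).items.length := by
  induction b generalizing e with
  | nil => simp
  | cons l b ih => exact le_trans (pv_len_step e l) (ih (pvPstep e l))

theorem pv_parse_ne (b : List String) (h : ∃ y ∈ b, pvColon y = true) :
    (pvParse b).items ≠ [] := by
  obtain ⟨y, hy, hcy⟩ := h
  obtain ⟨b₁, b₂, rfl⟩ := List.append_of_mem hy
  have : 1 ≤ (pvParse (b₁ ++ y :: b₂)).items.length := by
    unfold pvParse
    rw [List.foldl_append, List.foldl_cons]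
    exact le_trans (pv_pstep_colon_len _ y hcy) (pv_len_fold b₂ _)
  intro he
  rw [he] at this
  simp at this

theorem pv_nodupB (G : List (String × List String)) :
    (pvBF PySem.Dict.empty G).keys.Nodup := by
  exact PySem.Dict.nodup_keys_foldl_insert_key G (·.1) (fun d nb => pvParse nb.2) _
    PySem.Dict.nodup_keys_empty

-- ===== VERDICT (by name: the statement is the Claim_ definition above) =====
theorem parse_firewall_output_spec : Claim_unchanged_parse_firewall_output := by
  intro raw _ hD
  have hfalse : (((PySem.Str.splitlines raw).map PySem.Str.strip).tails.any pvDTail) = false := by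
    unfold D_parse_firewall_output at hD
    exact Bool.eq_false_iff.mpr hD
  rw [pv_repA, pv_repB,
    pv_CMP _ _ _ (pv_BR _ hfalse) (Or.inl ⟨rfl, PySem.Dict.nodup_keys_empty⟩)]

theorem parse_firewall_output_changed : Claim_changed_parse_firewall_output := by
  unfold Claim_changed_parse_firewall_output; decide

theorem parse_firewall_output_tight : Claim_exact_parse_firewall_output := by
  intro raw _ hD hEq
  have htrue : (((PySem.Str.splitlines raw).map PySem.Str.strip).tails.any pvDTail) = true := hD
  have hnot := pv_DQ _ htrue
  have hA := pv_VA (pvSegs ((PySem.Str.splitlines raw).map PySem.Str.strip))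
    PySem.Dict.empty hnot
  obtain ⟨b, hcol, hB⟩ := pv_VB (pvSegs ((PySem.Str.splitlines raw).map PySem.Str.strip))
    PySem.Dict.empty hnot
  have hne := pv_parse_ne b hcol
  rw [pv_repA, pv_repB] at hEq
  have hmemA : (("" : String), ([] : List (String × String))) ∈
      (pvAF PySem.Dict.empty
        (pvSegs ((PySem.Str.splitlines raw).map PySem.Str.strip))).items.map
        (fun p => (p.1, p.2.items)) :=
    List.mem_map.mpr ⟨("", PySem.Dict.empty), PySem.Dict.mem_items_of_get?_eq_some _ hA, rfl⟩
  rw [hEq] at hmemA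
  obtain ⟨p, hpmem, hpeq⟩ := List.mem_map.mp hmemA
  obtain ⟨p1, p2⟩ := p
  have hp1 : p1 = "" := congrArg Prod.fst hpeq
  have hp2 : p2.items = [] := congrArg Prod.snd hpeq
  subst hp1
  have hg := PySem.Dict.get?_of_mem_items _ hpmem (pv_nodupB _)
  rw [hB] at hg
  have : p2 = pvParse b := by injection hg.symm
  rw [this] at hp2
  exact hne hp2
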